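-- pv_equiv track=rewrite | github.com/zhenghh04/alcf_clearml_deployment | clearml_bridges/clearml_iri_bridge/_shared.py | _normalize_precommands
-- ===== SOURCE A (Python) =====
-- from typing import Any, List, Optional
--
-- def clean_str(value: Any) -> str:
--     """Return a stripped string, treating None/'none'/'null' as empty."""
--     if value is None:
--         return ""
--     normalized = str(value).strip()
--     if normalized.lower() in {"", "none", "null"}:
--         return ""
--     return normalized
--
-- def _normalize_script_text(script_text: str) -> str:
--     lines = []
--     for raw_line in script_text.splitlines():
--         line = raw_line.strip()
--         if not line or line.startswith("#!"):
--             continue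
--         lines.append(line)
--     return "; ".join(lines)
--
-- def _normalize_precommands(
--     precommand: str = "",
--     precommands: Optional[List[str]] = None,
-- ) -> str:
--     commands = []
--     normalized_precommand = clean_str(precommand)
--     if normalized_precommand:
--         commands.append(normalized_precommand)
--     if precommands:
--         for item in precommands:
--             normalized = clean_str(item)
--             if normalized:
--                 commands.append(normalized)
--     normalized_commands = []
--     for command in commands:
--         text = _normalize_script_text(command)
--         if text:
--             normalized_commands.append(text)
--     return "; ".join(normalized_commands)
-- ===== SOURCE B (Python) =====
-- from typing import Any, List, Optional
--
--
-- def clean_str(value: Any) -> str: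
--     """Return a stripped string, treating None/'none'/'null' as empty."""
--     if value is None:
--         return ""
--     normalized = str(value).strip()
--     if normalized.lower() in {"", "none", "null"}:
--         return ""
--     return normalized
--
--
-- def _normalize_precommands(
--     precommand: str = "",
--     precommands: Optional[List[str]] = None,
-- ) -> str:
--     # Stage 1: splice every cleaned command into ONE newline-joined script text.
--     script = clean_str(precommand)
--     for item in (precommands or []):
--         script += "\n" + clean_str(item)
--     # Stage 2: walk the script's lines once, appending each surviving line to a
--     # string accumulator (no intermediate lists, no join).
--     out = ""
--     for raw in script.splitlines():
--         line = raw.strip()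
--         if line and not line.startswith("#!"):
--             if out:
--                 out += "; "
--             out += line
--     return out
-- ===== Notes on version B (the rewrite author's own statement) =====
-- stated objective: alternative
-- what changed: B first splices all cleaned commands into one newline-joined script string, then scans that script's lines once, appending each surviving line to a string accumulator, instead of A's per-command line lists, per-command join and second join of the joined commands.
import Mathlib
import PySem

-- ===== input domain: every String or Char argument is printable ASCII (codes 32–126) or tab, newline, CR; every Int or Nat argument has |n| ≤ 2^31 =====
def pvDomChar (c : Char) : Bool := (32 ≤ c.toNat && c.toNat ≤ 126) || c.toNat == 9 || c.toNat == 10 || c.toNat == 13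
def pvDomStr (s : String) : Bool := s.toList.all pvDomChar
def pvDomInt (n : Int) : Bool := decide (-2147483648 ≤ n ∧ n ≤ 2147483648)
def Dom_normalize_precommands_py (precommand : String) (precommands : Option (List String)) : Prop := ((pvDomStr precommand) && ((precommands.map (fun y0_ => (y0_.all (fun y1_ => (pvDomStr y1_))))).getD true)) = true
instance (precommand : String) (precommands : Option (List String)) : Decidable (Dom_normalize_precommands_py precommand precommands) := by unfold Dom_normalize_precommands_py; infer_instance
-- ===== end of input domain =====

-- B splices every cleaned command into ONE newline-joined script text, then walks its
-- lines once, appending each surviving line to a string accumulator, with no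
-- intermediate command lists and no join calls (objective: alternative; same output as A).

-- ===== PORT A =====
-- shared module helper clean_str (both Python files define it verbatim)
def pvCleanStr (value : String) : String :=
  let normalized := PySem.Str.strip value
  if PySem.Str.lower normalized = "" ∨ PySem.Str.lower normalized = "none" ∨ PySem.Str.lower normalized = "null" then ""
  else normalized

def pvScriptText (script_text : String) : String :=
  let lines := (PySem.Str.splitlines script_text).foldl
    (fun acc raw_line =>
      let line := PySem.Str.strip raw_line
      if line = "" ∨ PySem.Str.startswith line "#!" then acc else acc ++ [line]) []
  PySem.Str.join "; " lines

def normalize_precommands_py (precommand : String) (precommands : Option (List String)) : String :=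
  let commands : List String := []
  let normalized_precommand := pvCleanStr precommand
  let commands := if normalized_precommand ≠ "" then commands ++ [normalized_precommand] else commands
  let commands :=
    match precommands with
    | some ps =>
        if ps ≠ [] then
          ps.foldl (fun acc item =>
            let n := pvCleanStr item
            if n ≠ "" then acc ++ [n] else acc) commands
        else commands
    | none => commands
  let normalized_commands := commands.foldl
    (fun acc command =>
      let text := pvScriptText command
      if text ≠ "" then acc ++ [text] else acc) []
  PySem.Str.join "; " normalized_commands

-- ===== PORT B =====
-- Python string concatenation a + b, modelled exactly as list append on code points
def pvCat (a b : String) : String := String.ofList (a.toList ++ b.toList)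

def normalize_precommands_py_alt (precommand : String) (precommands : Option (List String)) : String :=
  let script := (precommands.getD []).foldl
    (fun s item => pvCat s (pvCat "\n" (pvCleanStr item))) (pvCleanStr precommand)
  (PySem.Str.splitlines script).foldl
    (fun out raw =>
      let line := PySem.Str.strip raw
      if line ≠ "" ∧ ¬ PySem.Str.startswith line "#!" then
        pvCat (if out ≠ "" then pvCat out "; " else out) line
      else out) ""

-- ===== PRECONDITION & SPEC =====
def Spec_normalize_precommands_py (precommand : String) (precommands : Option (List String)) (out : String) : Prop := out = normalize_precommands_py_alt precommand precommands
instance (precommand : String) (precommands : Option (List String)) (out : String) : Decidable (Spec_normalize_precommands_py precommand precommands out) := by unfold Spec_normalize_precommands_py; infer_instance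

-- ===== CLAIM (what is proved, stated in full; the proofs are below) =====
def Claim_equal_normalize_precommands_py : Prop := ∀ (precommand : String) (precommands : Option (List String)), Dom_normalize_precommands_py precommand precommands → Spec_normalize_precommands_py precommand precommands (normalize_precommands_py precommand precommands)

-- ===== LEMMAS AND PROOFS =====

-- the surviving lines of one command text (String level)
def pvKeep (l : String) : Bool := !(l == "" || PySem.Str.startswith l "#!")
def pvLines (c : String) : List String := ((PySem.Str.splitlines c).map PySem.Str.strip).filter pvKeep

-- ============ A-side: A = join "; " of the flat list of surviving lines ============

theorem pvA_inner_fold (L : List String) (acc : List String) :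
    L.foldl (fun acc raw_line =>
      let line := PySem.Str.strip raw_line
      if line = "" ∨ PySem.Str.startswith line "#!" then acc else acc ++ [line]) acc
    = acc ++ (L.map PySem.Str.strip).filter pvKeep := by
  induction L generalizing acc with
  | nil => simp
  | cons x t ih =>
    simp only [List.foldl_cons, List.map_cons, List.filter_cons, ih]
    by_cases h1 : PySem.Str.strip x = "" <;>
      by_cases h2 : PySem.Chars.startswith (PySem.Chars.strip x.toList) ['#', '!'] = true <;>
      simp [pvKeep, h1, h2]

theorem pvScriptText_eq (c : String) : pvScriptText c = PySem.Str.join "; " (pvLines c) := by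
  unfold pvScriptText pvLines
  rw [pvA_inner_fold]
  simp

theorem pvA_collect_fold (L : List String) (acc : List String) :
    L.foldl (fun acc item =>
      let n := pvCleanStr item
      if n ≠ "" then acc ++ [n] else acc) acc
    = acc ++ (L.map pvCleanStr).filter (fun s => s != "") := by
  induction L generalizing acc with
  | nil => simp
  | cons x t ih =>
    simp only [List.foldl_cons, List.map_cons, List.filter_cons, ih]
    by_cases h : pvCleanStr x = "" <;> simp [h]

theorem pvA_outer_fold (L : List String) (acc : List String) :
    L.foldl (fun acc command =>
      let text := pvScriptText command
      if text ≠ "" then acc ++ [text] else acc) acc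
    = acc ++ (L.map pvScriptText).filter (fun s => s != "") := by
  induction L generalizing acc with
  | nil => simp
  | cons x t ih =>
    simp only [List.foldl_cons, List.map_cons, List.filter_cons, ih]
    by_cases h : pvScriptText x = "" <;> simp [h]

-- a join of nonempty pieces over a nonempty list is nonempty
theorem pvJoin_ne_nil (sep : List Char) (l : List (List Char))
    (hl : l ≠ []) (h : ∀ x ∈ l, x ≠ []) : PySem.Chars.join sep l ≠ [] := by
  match l with
  | [] => exact absurd rfl hl
  | [x] =>
    rw [PySem.Chars.join_singleton]
    exact h x (by simp)
  | x :: y :: t =>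
    rw [PySem.Chars.join_cons_cons]
    have hx := h x (by simp)
    cases x with
    | nil => exact absurd rfl hx
    | cons c cs => simp

theorem pvJoin_append (sep : List Char) (a b : List (List Char))
    (ha : a ≠ []) (hb : b ≠ []) :
    PySem.Chars.join sep (a ++ b) = PySem.Chars.join sep a ++ sep ++ PySem.Chars.join sep b := by
  induction a with
  | nil => exact absurd rfl ha
  | cons x t ih =>
    cases t with
    | nil =>
      cases b with
      | nil => exact absurd rfl hb
      | cons y u =>
        simp only [List.cons_append, List.nil_append]
        rw [PySem.Chars.join_cons_cons, PySem.Chars.join_singleton]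
    | cons y u =>
      have : (x :: y :: u) ++ b = x :: ((y :: u) ++ b) := by simp
      rw [this]
      have h2 : (y :: u) ++ b = y :: (u ++ b) := by simp
      rw [h2, PySem.Chars.join_cons_cons, ← h2, ih (by simp), PySem.Chars.join_cons_cons]
      simp [List.append_assoc]

-- join of the nonempty per-piece joins equals the join of the flattened lines
theorem pvJoin_flatten (sep : List Char) (lls : List (List (List Char)))
    (h : ∀ l ∈ lls.flatten, l ≠ []) :
    PySem.Chars.join sep ((lls.map (PySem.Chars.join sep)).filter (fun t => !(t == [])))
      = PySem.Chars.join sep lls.flatten := by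
  induction lls with
  | nil => rfl
  | cons l t ih =>
    have ht : ∀ x ∈ t.flatten, x ≠ [] := fun x hx => h x (by simp [hx])
    by_cases hl : l = []
    · subst hl; simpa using ih ht
    · have hlines : ∀ x ∈ l, x ≠ [] := fun x hx => h x (by simp [hx])
      have hjl : PySem.Chars.join sep l ≠ [] := pvJoin_ne_nil sep l hl hlines
      simp only [List.map_cons, List.filter_cons, List.flatten_cons]
      rw [if_pos (by simpa using hjl)]
      by_cases hf : t.flatten = []
      · have hall : ∀ x ∈ t, x = [] := by
          intro x hx
          by_contra hne
          rcases List.exists_mem_of_ne_nil x hne with ⟨c, hc⟩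
          have : c ∈ t.flatten := List.mem_flatten.mpr ⟨x, hx, hc⟩
          simp [hf] at this
        have : (t.map (PySem.Chars.join sep)).filter (fun t => !(t == [])) = [] := by
          rw [List.filter_eq_nil_iff]
          intro a ha
          rcases List.mem_map.mp ha with ⟨x, hx, rfl⟩
          simp [hall x hx, PySem.Chars.join_nil]
        rw [hf, this]
        simp [PySem.Chars.join_singleton]
      · have hjf : PySem.Chars.join sep t.flatten ≠ [] := pvJoin_ne_nil sep t.flatten hf ht
        have ihv := ih ht
        have hFne : (t.map (PySem.Chars.join sep)).filter (fun t => !(t == [])) ≠ [] := by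
          intro hF
          rw [hF] at ihv
          exact hjf (ihv.symm.trans (PySem.Chars.join_nil sep))
        rw [pvJoin_append sep l t.flatten hl hf, ← ihv]
        cases hFeq : (t.map (PySem.Chars.join sep)).filter (fun t => !(t == [])) with
        | nil => exact absurd hFeq hFne
        | cons z zs =>
          rw [PySem.Chars.join_cons_cons]

-- String-level corollary
theorem pvBeq_nil (s : String) : (s.toList == []) = (s == "") := by
  by_cases h : s = ""
  · subst h; rfl
  · have h2 : s.toList ≠ [] := by
      intro hl
      exact h (String.toList_inj.mp (by rw [hl]; rfl))
    rw [beq_eq_false_iff_ne.mpr h, beq_eq_false_iff_ne.mpr h2]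

theorem pvJoin_flatten_str (lls : List (List String))
    (h : ∀ l ∈ lls.flatten, l ≠ "") :
    PySem.Str.join "; " ((lls.map (PySem.Str.join "; ")).filter (fun t => t != ""))
      = PySem.Str.join "; " lls.flatten := by
  have hpred : ∀ l : List String,
      (!(PySem.Chars.join ("; ".toList) (l.map String.toList) == [])) = (PySem.Str.join "; " l != "") := by
    intro l
    rw [← PySem.Str.toList_join, pvBeq_nil]
    simp [bne]
  have key : ((lls.map (PySem.Str.join "; ")).filter (fun t => t != "")).map String.toList
      = ((lls.map (fun l => l.map String.toList)).map (PySem.Chars.join ("; ".toList))).filter (fun t => !(t == [])) := by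
    clear h
    induction lls with
    | nil => rfl
    | cons l t ih =>
      simp only [List.map_cons, List.filter_cons, hpred l]
      cases hb : (PySem.Str.join "; " l != "") with
      | false => simpa [hb] using ih
      | true =>
        simp only [if_true]
        rw [List.map_cons, ih, PySem.Str.toList_join]
  have harg : ∀ x ∈ ((lls.map (fun l => l.map String.toList)).flatten), x ≠ [] := by
    intro x hx
    rcases List.mem_flatten.mp hx with ⟨L, hL, hxL⟩
    rcases List.mem_map.mp hL with ⟨l, hl, rfl⟩
    rcases List.mem_map.mp hxL with ⟨s, hs, rfl⟩
    have hne := h s (List.mem_flatten.mpr ⟨l, hl, hs⟩)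
    intro hxl
    exact hne (String.toList_inj.mp (by rw [hxl]; rfl))
  have hmain := pvJoin_flatten ("; ".toList) (lls.map (fun l => l.map String.toList)) harg
  simp only [PySem.Str.join]
  rw [key, hmain]
  congr 1
  rw [← List.map_flatten]

theorem pvLines_nil : pvLines "" = [] := rfl

theorem pvLines_mem_ne (c : String) : ∀ l ∈ pvLines c, l ≠ "" := by
  intro l hl
  have := (List.mem_filter.mp hl).2
  simp only [pvKeep, Bool.not_eq_eq_eq_not, Bool.not_true, Bool.or_eq_false_iff] at this
  intro h
  subst h
  simp at this

-- the intermediate filters on A's side can be absorbed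
theorem pvFilter_absorb (cs : List String) :
    (((cs.filter (fun s => s != "")).map pvScriptText).filter (fun s => s != ""))
      = ((cs.map pvScriptText).filter (fun s => s != "")) := by
  induction cs with
  | nil => rfl
  | cons c t ih =>
    by_cases h : c = ""
    · subst h
      have hsc : pvScriptText "" = "" := by
        rw [pvScriptText_eq, pvLines_nil]; rfl
      have hff : (("" : String) != "") = false := by rfl
      simp only [List.filter_cons, List.map_cons, hsc, hff, Bool.false_eq_true, if_false]
      exact ih
    · simp [h, ih, List.filter_cons]

theorem pvMain (cs : List String) :
    PySem.Str.join "; " (((cs.filter (fun s => s != "")).map pvScriptText).filter (fun s => s != ""))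
      = PySem.Str.join "; " (cs.flatMap pvLines) := by
  rw [pvFilter_absorb]
  have h1 : cs.map pvScriptText = (cs.map pvLines).map (PySem.Str.join "; ") := by
    simp [List.map_map, Function.comp, pvScriptText_eq]
  have h2 : cs.flatMap pvLines = (cs.map pvLines).flatten := by
    simp [List.flatMap_def]
  rw [h1, h2]
  exact pvJoin_flatten_str (cs.map pvLines) (by
    intro l hl
    rcases List.mem_flatten.mp hl with ⟨L, hL, hlL⟩
    rcases List.mem_map.mp hL with ⟨c, _, rfl⟩
    exact pvLines_mem_ne c l hlL)

theorem pvA_head (p : String) :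
    (if pvCleanStr p ≠ "" then [pvCleanStr p] else [])
      = ([p].map pvCleanStr).filter (fun s => s != "") := by
  by_cases h : pvCleanStr p = "" <;> simp [h]

theorem pvA_commands (p : String) (ps : List String) :
    (if ps ≠ [] then
      ps.foldl (fun acc item =>
        let n := pvCleanStr item
        if n ≠ "" then acc ++ [n] else acc)
        (if pvCleanStr p ≠ "" then [pvCleanStr p] else [])
    else (if pvCleanStr p ≠ "" then [pvCleanStr p] else []))
    = ((p :: ps).map pvCleanStr).filter (fun s => s != "") := by
  by_cases hps : ps = []
  · subst hps
    simpa using pvA_head p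
  · rw [if_pos hps, pvA_collect_fold, pvA_head p, ← List.filter_append, ← List.map_append,
      List.singleton_append]

-- A's value, characterised
theorem pvA_value (p : String) (ps : Option (List String)) :
    normalize_precommands_py p ps = PySem.Str.join "; " (((p :: ps.getD []).map pvCleanStr).flatMap pvLines) := by
  unfold normalize_precommands_py
  cases ps with
  | none =>
    simp only [Option.getD_none, List.nil_append]
    rw [pvA_outer_fold]
    simp only [List.nil_append]
    rw [pvA_head p]
    exact pvMain ([p].map pvCleanStr)
  | some l =>
    simp only [Option.getD_some, List.nil_append]
    rw [pvA_outer_fold]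
    simp only [List.nil_append]
    rw [pvA_commands p l]
    exact pvMain ((p :: l).map pvCleanStr)

-- ============ B-side: the splitlines machinery ============

def pvIsB (c : Char) : Bool :=
  have n := c.toNat
  decide (n = 10) || decide (n = 13) || decide (n = 11) || decide (n = 12) || decide (n = 28) || decide (n = 29) || decide (n = 30) || decide (n = 133) || decide (n = 8232) || decide (n = 8233)

theorem pvSplitlines_eq_go (s : List Char) : PySem.Chars.splitlines s = PySem.Chars.splitlines.go pvIsB s [] [] := rfl

theorem pvGoNil (cur : List Char) (acc : List (List Char)) :
    PySem.Chars.splitlines.go pvIsB [] cur acc = if cur.isEmpty then acc.reverse else (cur.reverse :: acc).reverse := rfl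

theorem pvGoCrlf (rest cur : List Char) (acc : List (List Char)) :
    PySem.Chars.splitlines.go pvIsB ('\r'::'\n'::rest) cur acc = PySem.Chars.splitlines.go pvIsB rest [] (cur.reverse::acc) := rfl

theorem pvGoStep (c : Char) (rest cur : List Char) (acc : List (List Char))
    (h : ¬(c = '\r' ∧ ∃ r2, rest = '\n'::r2)) :
    PySem.Chars.splitlines.go pvIsB (c::rest) cur acc =
      if pvIsB c then PySem.Chars.splitlines.go pvIsB rest [] (cur.reverse::acc)
      else PySem.Chars.splitlines.go pvIsB rest (c::cur) acc := by
  rw [PySem.Chars.splitlines.go.eq_def]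
  split
  · rename_i heq; cases heq
  · rename_i heq
    injection heq with h1 h2
    exact absurd ⟨h1, _, h2⟩ h
  · rename_i heq
    injection heq with h1 h2
    subst h1; subst h2; rfl

-- accumulator generalization
theorem pvGoAcc (s cur : List Char) (acc : List (List Char)) :
    PySem.Chars.splitlines.go pvIsB s cur acc = acc.reverse ++ PySem.Chars.splitlines.go pvIsB s cur [] := by
  induction hn : s.length using Nat.strong_induction_on generalizing s cur acc with
  | _ n ih =>
    by_cases hp : s = [] 
    · subst hp; rw [pvGoNil, pvGoNil]; by_cases hc : cur.isEmpty <;> simp [hc]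
    · rcases s with _ | ⟨c, rest⟩
      · exact absurd rfl hp
      by_cases hcr : c = '\r' ∧ ∃ r2, rest = '\n'::r2
      · obtain ⟨hc, r2, hr⟩ := hcr
        subst hc; subst hr
        rw [pvGoCrlf, pvGoCrlf]
        rw [ih r2.length (by simp [← hn]) r2 [] (cur.reverse :: acc) rfl,
            ih r2.length (by simp [← hn]) r2 [] [cur.reverse] rfl]
        simp
      · rw [pvGoStep c rest cur acc hcr, pvGoStep c rest cur [] hcr]
        by_cases hb : pvIsB c
        · simp only [hb, if_true]
          rw [ih rest.length (by simp [← hn]) rest [] (cur.reverse :: acc) rfl,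
              ih rest.length (by simp [← hn]) rest [] [cur.reverse] rfl]
          simp
        · simp only [hb]
          exact ih rest.length (by simp [← hn]) rest (c::cur) acc rfl

-- splitting at an inserted '\n' separator
theorem pvGoApp (a b cur : List Char) (acc : List (List Char)) :
    PySem.Chars.splitlines.go pvIsB (a ++ '\n' :: b) cur acc =
      PySem.Chars.splitlines.go pvIsB (a ++ ['\n']) cur acc ++ PySem.Chars.splitlines.go pvIsB b [] [] := by
  induction hn : a.length using Nat.strong_induction_on generalizing a cur acc with
  | _ n ih =>
    rcases a with _ | ⟨c, rest⟩
    · simp only [List.nil_append]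
      rw [pvGoStep '\n' b cur acc (by rintro ⟨h, -⟩; exact absurd h (by decide)),
          pvGoStep '\n' [] cur acc (by rintro ⟨h, -⟩; exact absurd h (by decide)), pvGoNil]
      have hB : pvIsB '\n' = true := by decide
      simp only [hB, if_true]
      rw [pvGoAcc b [] (cur.reverse :: acc)]
      simp
    · by_cases hcr : c = '\r' ∧ ∃ r2, rest = '\n'::r2
      · obtain ⟨hc, r2, hr⟩ := hcr
        subst hc; subst hr
        simp only [List.cons_append]
        rw [pvGoCrlf, pvGoCrlf]
        exact ih r2.length (by simp [← hn]) r2 [] (cur.reverse :: acc) rfl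
      · by_cases hsp : c = '\r' ∧ rest = []
        · obtain ⟨hc, hre⟩ := hsp
          subst hc; subst hre
          simp only [List.cons_append, List.nil_append]
          rw [pvGoCrlf, pvGoAcc b [] (cur.reverse :: acc), pvGoCrlf [] cur acc, pvGoNil]
          simp
        · have hL : ¬(c = '\r' ∧ ∃ r2, rest ++ '\n'::b = '\n'::r2) := by
            rintro ⟨hc, r2, hr⟩
            rcases rest with _ | ⟨d, t⟩
            · exact hsp ⟨hc, rfl⟩
            · simp only [List.cons_append] at hr
              injection hr with h1 h2
              exact hcr ⟨hc, t, by rw [h1]⟩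
          have hR : ¬(c = '\r' ∧ ∃ r2, rest ++ ['\n'] = '\n'::r2) := by
            rintro ⟨hc, r2, hr⟩
            rcases rest with _ | ⟨d, t⟩
            · exact hsp ⟨hc, rfl⟩
            · simp only [List.cons_append] at hr
              injection hr with h1 h2
              exact hcr ⟨hc, t, by rw [h1]⟩
          simp only [List.cons_append]
          rw [pvGoStep c (rest ++ '\n'::b) cur acc hL, pvGoStep c (rest ++ ['\n']) cur acc hR]
          by_cases hb : pvIsB c
          · simp only [hb, if_true]
            exact ih rest.length (by simp [← hn]) rest [] (cur.reverse :: acc) rfl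
          · simp only [hb]
            exact ih rest.length (by simp [← hn]) rest (c::cur) acc rfl

-- 'good' text: does not end in a line-break character (vacuous for [])
def pvGoodC (a : List Char) : Prop := ∀ c, a.getLast? = some c → pvIsB c = false

theorem pvGoodC_cons (c : Char) (rest : List Char) (h : pvGoodC (c::rest)) (hne : rest ≠ []) : pvGoodC rest := by
  intro d hd
  apply h d
  rcases rest with _ | ⟨e, t⟩
  · exact absurd rfl hne
  · rw [List.getLast?_cons_cons]; exact hd

-- a trailing inserted '\n' is dropped when the text is good and nonempty
theorem pvGoNl (a cur : List Char) (acc : List (List Char)) (hg : pvGoodC a) (hne : a ≠ []) :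
    PySem.Chars.splitlines.go pvIsB (a ++ ['\n']) cur acc = PySem.Chars.splitlines.go pvIsB a cur acc := by
  induction hn : a.length using Nat.strong_induction_on generalizing a cur acc with
  | _ n ih =>
    rcases a with _ | ⟨c, rest⟩
    · exact absurd rfl hne
    · by_cases hcr : c = '\r' ∧ ∃ r2, rest = '\n'::r2
      · obtain ⟨hc, r2, hr⟩ := hcr
        subst hc; subst hr
        simp only [List.cons_append]
        rw [pvGoCrlf, pvGoCrlf]
        rcases eq_or_ne r2 [] with hr2 | hr2
        · subst hr2
          have := hg '\n' (by simp)
          simp [pvIsB] at this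
        · exact ih r2.length (by simp [← hn]) r2 [] (cur.reverse::acc)
            (pvGoodC_cons _ _ (pvGoodC_cons _ _ hg (by simp)) hr2) hr2 rfl
      · have hcne : c = '\r' → rest ≠ [] := by
          rintro hc rfl
          have := hg c (by simp)
          rw [hc] at this
          simp [pvIsB] at this
        have hL : ¬(c = '\r' ∧ ∃ r2, rest ++ ['\n'] = '\n'::r2) := by
          rintro ⟨hc, r2, hr⟩
          rcases rest with _ | ⟨d, t⟩
          · exact hcne hc rfl
          · simp only [List.cons_append] at hr
            injection hr with h1 h2
            exact hcr ⟨hc, t, by rw [h1]⟩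
        simp only [List.cons_append]
        rw [pvGoStep c (rest ++ ['\n']) cur acc hL, pvGoStep c rest cur acc hcr]
        rcases eq_or_ne rest [] with hre | hre
        · subst hre
          have hbc : pvIsB c = false := hg c (by simp)
          simp only [hbc, List.nil_append, Bool.false_eq_true, if_false]
          rw [pvGoStep '\n' [] (c::cur) acc (by rintro ⟨h, -⟩; exact absurd h (by decide)), pvGoNil, pvGoNil]
          have : pvIsB '\n' = true := by decide
          simp [this, pvGoNil]
        · have hgr : pvGoodC rest := pvGoodC_cons _ _ hg hre
          by_cases hb : pvIsB c
          · simp only [hb, if_true]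
            exact ih rest.length (by simp [← hn]) rest [] (cur.reverse::acc) hgr hre rfl
          · simp only [hb]
            exact ih rest.length (by simp [← hn]) rest (c::cur) acc hgr hre rfl

def pvKeepC (l : List Char) : Bool := !(l == [] || PySem.Chars.startswith l ['#','!'])
def pvFKC (ls : List (List Char)) : List (List Char) := (ls.map PySem.Chars.strip).filter pvKeepC

theorem pvFKC_append (x y : List (List Char)) : pvFKC (x ++ y) = pvFKC x ++ pvFKC y := by
  simp [pvFKC]

theorem pvSplitNl (d b : List Char) (hg : pvGoodC d) :
    pvFKC (PySem.Chars.splitlines (d ++ '\n' :: b)) = pvFKC (PySem.Chars.splitlines d) ++ pvFKC (PySem.Chars.splitlines b) := by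
  rw [pvSplitlines_eq_go (d ++ '\n' :: b), pvGoApp, pvFKC_append, ← pvSplitlines_eq_go b]
  rcases eq_or_ne d [] with hd | hd
  · subst hd
    have h1 : PySem.Chars.splitlines.go pvIsB ([] ++ ['\n']) [] [] = [[]] := by
      simp only [List.nil_append]
      rw [pvGoStep '\n' [] [] [] (by rintro ⟨h, -⟩; exact absurd h (by decide)), pvGoNil]
      simp [show pvIsB '\n' = true from by decide]
    rw [show ([] : List Char) ++ ['\n'] = ['\n'] from rfl] at h1 ⊢
    rw [h1]
    rfl
  · rw [pvGoNl d [] [] hg hd, ← pvSplitlines_eq_go d]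

theorem pvSplitJoinC (ds : List (List Char)) (h : ∀ d ∈ ds, pvGoodC d) :
    pvFKC (PySem.Chars.splitlines (PySem.Chars.join ['\n'] ds)) = ds.flatMap (fun d => pvFKC (PySem.Chars.splitlines d)) := by
  induction ds with
  | nil => rfl
  | cons d t ih =>
    rcases t with _ | ⟨e, t2⟩
    · rw [PySem.Chars.join_singleton]
      simp
    · rw [PySem.Chars.join_cons_cons]
      have : d ++ ['\n'] ++ PySem.Chars.join ['\n'] (e::t2) = d ++ '\n' :: PySem.Chars.join ['\n'] (e::t2) := by simp
      rw [this, pvSplitNl d _ (h d (by simp)), ih (fun x hx => h x (by simp [hx]))]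
      simp


-- pvIsB agrees with the break test inside PySem.Chars.splitlines, and breaks are whitespace
theorem pvIsB_isspace (c : Char) (h : pvIsB c = true) : PySem.Chars.isspace c = true := by
  simp only [pvIsB, PySem.Chars.isspace] at *
  rcases Bool.or_eq_true_iff.mp h with h2 | h2
  · simp_all
    omega
  · simp_all

-- a stripped text never ends in a break character
theorem pvGoodStrip (l : List Char) : pvGoodC (PySem.Chars.strip l) := by
  intro c hc
  have h := List.head?_dropWhile_not PySem.Chars.isspace (PySem.Chars.lstrip l).reverse
  rw [PySem.Chars.strip, PySem.Chars.rstrip, List.getLast?_reverse] at hc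
  have h2 : PySem.Chars.isspace c = false := by rw [hc] at h; exact h
  by_contra hb
  rw [Bool.not_eq_false] at hb
  rw [pvIsB_isspace c hb] at h2
  cases h2

theorem pvCat_toList (a b : String) : (pvCat a b).toList = a.toList ++ b.toList := String.toList_ofList

theorem pvClean_cases (v : String) : pvCleanStr v = "" ∨ pvCleanStr v = PySem.Str.strip v := by
  unfold pvCleanStr
  by_cases h : PySem.Str.lower (PySem.Str.strip v) = "" ∨ PySem.Str.lower (PySem.Str.strip v) = "none" ∨ PySem.Str.lower (PySem.Str.strip v) = "null"
  · left; simp [h]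
  · right; simp [h]

theorem pvCleanGood (v : String) : pvGoodC (pvCleanStr v).toList := by
  rcases pvClean_cases v with h | h <;> rw [h]
  · intro c hc; simp at hc
  · rw [PySem.Str.toList_strip]
    exact pvGoodStrip v.toList

-- the staged script text is exactly the '\n'-join of the cleaned commands
theorem pvFoldCat (L : List String) (s0 : String) :
    (L.foldl (fun s it => pvCat s (pvCat "\n" (pvCleanStr it))) s0).toList
      = s0.toList ++ L.flatMap (fun it => '\n' :: (pvCleanStr it).toList) := by
  induction L generalizing s0 with
  | nil => simp
  | cons x t ih =>
    simp only [List.foldl_cons, List.flatMap_cons, ih, pvCat_toList]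
    simp [show ("\n" : String).toList = ['\n'] from rfl]

theorem pvJoinNlFlat (c : List Char) (ds : List (List Char)) :
    PySem.Chars.join ['\n'] (c :: ds) = c ++ ds.flatMap (fun d => '\n' :: d) := by
  induction ds generalizing c with
  | nil => rw [PySem.Chars.join_singleton]; simp
  | cons d t ih =>
    rw [PySem.Chars.join_cons_cons, ih d]
    simp

-- filtered surviving lines, bridged between String and Chars levels
theorem pvKeep_bridge (x : String) : pvKeep x = pvKeepC x.toList := by
  unfold pvKeep pvKeepC
  rw [pvBeq_nil]
  rfl

theorem pvFKC_bridge (l : List String) :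
    ((l.map PySem.Str.strip).filter pvKeep).map String.toList = pvFKC (l.map String.toList) := by
  unfold pvFKC
  induction l with
  | nil => rfl
  | cons x t ih =>
    simp only [List.map_cons, List.filter_cons]
    rw [pvKeep_bridge, PySem.Str.toList_strip]
    by_cases h : pvKeepC (PySem.Chars.strip x.toList) = true
    · simp only [h, if_true, List.map_cons, ih, PySem.Str.toList_strip]
    · simp only [Bool.not_eq_true] at h
      simp only [h, Bool.false_eq_true, if_false, ih]

theorem pvLines_toList (c : String) :
    (pvLines c).map String.toList = pvFKC (PySem.Chars.splitlines c.toList) := by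
  unfold pvLines
  rw [pvFKC_bridge, PySem.Str.splitlines_map_toList]

-- glue: a piece that already carries the separator may be split off
theorem pvJoin_glue (sep a b : List Char) (rest : List (List Char)) :
    PySem.Chars.join sep ((a ++ sep ++ b) :: rest) = PySem.Chars.join sep (a :: b :: rest) := by
  cases rest with
  | nil =>
    rw [PySem.Chars.join_singleton, PySem.Chars.join_cons_cons, PySem.Chars.join_singleton]
  | cons r rs =>
    rw [PySem.Chars.join_cons_cons, PySem.Chars.join_cons_cons, PySem.Chars.join_cons_cons]
    simp [List.append_assoc]

theorem pvCat_ne_empty_right (a b : String) (hb : b ≠ "") : pvCat a b ≠ "" := by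
  intro h
  have h2 : a.toList ++ b.toList = [] := by
    have := congrArg String.toList h
    rw [pvCat_toList] at this
    simpa using this
  rcases List.append_eq_nil_iff.mp h2 with ⟨-, h3⟩
  exact hb (String.toList_inj.mp (by rw [h3]; rfl))

-- the emission loop: its accumulator is the join of the lines kept so far
theorem pvEmit (L : List String) (acc : String) :
    (L.foldl (fun out raw =>
      let line := PySem.Str.strip raw
      if line ≠ "" ∧ ¬ PySem.Str.startswith line "#!" then
        pvCat (if out ≠ "" then pvCat out "; " else out) line
      else out) acc).toList
    = PySem.Chars.join [';', ' ']
        ((if acc = "" then [] else [acc.toList]) ++ ((L.map PySem.Str.strip).filter pvKeep).map String.toList) := by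
  induction L generalizing acc with
  | nil =>
    by_cases h : acc = ""
    · subst h; rfl
    · rw [if_neg h]
      simp [PySem.Chars.join_singleton]
  | cons x t ih =>
    simp only [List.foldl_cons, List.map_cons, List.filter_cons]
    by_cases hk : pvKeep (PySem.Str.strip x) = true
    · have hne : PySem.Str.strip x ≠ "" := by
        simp only [pvKeep, Bool.not_eq_eq_eq_not, Bool.not_true, Bool.or_eq_false_iff] at hk
        simpa using beq_eq_false_iff_ne.mp hk.1
      have hcond : PySem.Str.strip x ≠ "" ∧ ¬ PySem.Str.startswith (PySem.Str.strip x) "#!" := by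
        simp only [pvKeep, Bool.not_eq_eq_eq_not, Bool.not_true, Bool.or_eq_false_iff] at hk
        exact ⟨hne, by rw [hk.2]; simp⟩
      rw [if_pos hcond, if_pos hk, ih]
      have hacc : pvCat (if acc ≠ "" then pvCat acc "; " else acc) (PySem.Str.strip x) ≠ "" :=
        pvCat_ne_empty_right _ _ hne
      rw [if_neg hacc]
      by_cases ha : acc = ""
      · subst ha
        rw [if_pos rfl, if_neg (by simp), pvCat_toList]
        simp
      · rw [if_neg ha, if_pos ha, pvCat_toList, pvCat_toList]
        have hsep : ("; " : String).toList = [';', ' '] := rfl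
        rw [hsep, List.singleton_append, List.singleton_append, List.map_cons,
            pvJoin_glue [';', ' '] acc.toList (PySem.Str.strip x).toList]
    · have hcond : ¬(PySem.Str.strip x ≠ "" ∧ ¬ PySem.Str.startswith (PySem.Str.strip x) "#!") := by
        rintro ⟨h1, h2⟩
        apply hk
        simp only [pvKeep, Bool.not_eq_eq_eq_not, Bool.not_true, Bool.or_eq_false_iff]
        exact ⟨beq_eq_false_iff_ne.mpr h1, Bool.eq_false_iff.mpr h2⟩
      rw [if_neg hcond]
      simp only [Bool.not_eq_true] at hk
      rw [hk]
      simp only [Bool.false_eq_true, if_false]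
      exact ih acc

-- B's value, characterised: the same flat join
theorem pvB_value (p : String) (ps : Option (List String)) :
    normalize_precommands_py_alt p ps = PySem.Str.join "; " (((p :: ps.getD []).map pvCleanStr).flatMap pvLines) := by
  unfold normalize_precommands_py_alt
  apply String.toList_inj.mp
  rw [pvEmit, PySem.Str.toList_join, if_pos rfl, List.nil_append]
  have hlist : (((PySem.Str.splitlines ((ps.getD []).foldl (fun s item => pvCat s (pvCat "\n" (pvCleanStr item))) (pvCleanStr p))).map PySem.Str.strip).filter pvKeep).map String.toList
      = (((p :: ps.getD []).map pvCleanStr).flatMap pvLines).map String.toList := by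
    rw [pvFKC_bridge, PySem.Str.splitlines_map_toList, pvFoldCat]
    have hscript : (pvCleanStr p).toList ++ (ps.getD []).flatMap (fun it => '\n' :: (pvCleanStr it).toList)
        = PySem.Chars.join ['\n'] (((p :: ps.getD []).map pvCleanStr).map String.toList) := by
      simp only [List.map_cons]
      rw [pvJoinNlFlat]
      congr 1
      rw [List.map_map, List.flatMap_map]
      rfl
    rw [hscript, pvSplitJoinC _ (by
      intro d hd
      rcases List.mem_map.mp hd with ⟨x, hx, rfl⟩
      rcases List.mem_map.mp hx with ⟨v, _, rfl⟩
      exact pvCleanGood v)]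
    have hflat : ∀ (L : List String), (L.map String.toList).flatMap (fun d => pvFKC (PySem.Chars.splitlines d))
        = (L.flatMap pvLines).map String.toList := by
      intro L
      induction L with
      | nil => rfl
      | cons a t ih => simp only [List.map_cons, List.flatMap_cons, List.map_append, ih, pvLines_toList]
    rw [hflat]
  rw [hlist]
  rfl

-- ===== VERDICT (by name: the statement is the Claim_ definition above) =====
theorem normalize_precommands_py_spec : Claim_equal_normalize_precommands_py := by
  intro precommand precommands _
  unfold Spec_normalize_precommands_py
  exact (pvA_value _ _).trans (pvB_value _ _).symm
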